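-- pv_equiv track=rewrite | github.com/ilovelogic/Pauli-Path-Method | Path_Generation/circuit_sim.py | valid_gate_pos
-- ===== SOURCE A (Python) =====
-- from typing import List
--
-- def valid_gate_pos(num_qubits:int, gate_pos:List[List[tuple]]):
--     for gate_pos_layer in gate_pos:
--         gate_pos_layer_set = set()
--         for pos in gate_pos_layer:
--             # Check that the positions reference qubits in the circuit
--             if pos[0] < 0 or pos[0] > num_qubits-1:
--                 return False
--             if pos[1] < 0 or pos[1] > num_qubits-1:
--                 return False
--             # Check that there are no qubits that are input to two different gates at a gate layer
--             if pos[0] in gate_pos_layer_set or pos[1] in gate_pos_layer_set: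
--                 return False
--             gate_pos_layer_set.add(pos[0])
--             gate_pos_layer_set.add(pos[1])
--     return True
-- ===== SOURCE B (Python) =====
-- from typing import List
--
-- def _layer_in_range(num_qubits, layer):
--     return all(0 <= p[0] < num_qubits and 0 <= p[1] < num_qubits for p in layer)
--
-- def _disjoint_gates(layer):
--     # recursive pairwise check: the first gate must share no qubit with any later gate
--     if not layer:
--         return True
--     head, rest = layer[0], layer[1:]
--     if any(head[0] == g[0] or head[0] == g[1] or head[1] == g[0] or head[1] == g[1]
--            for g in rest):
--         return False
--     return _disjoint_gates(rest)
--
-- def valid_gate_pos(num_qubits: int, gate_pos: List[List[tuple]]):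
--     # stage 1: every referenced qubit is in range
--     if not all(_layer_in_range(num_qubits, layer) for layer in gate_pos):
--         return False
--     # stage 2: within each layer, no two distinct gates share a qubit
--     return all(_disjoint_gates(layer) for layer in gate_pos)
-- ===== Notes on version B (the rewrite author's own statement) =====
-- stated objective: alternative
-- what changed: B replaces A's single pass with an incrementally maintained per-layer set of touched qubits by two staged passes with no set at all: first a bounds-only pass over all layers, then a recursive pairwise gate-vs-gate endpoint comparison (head gate against every later gate) per layer; correct because A returns True exactly when every endpoint is in range and no two distinct gates of a layer share a qubit.
import Mathlib
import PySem

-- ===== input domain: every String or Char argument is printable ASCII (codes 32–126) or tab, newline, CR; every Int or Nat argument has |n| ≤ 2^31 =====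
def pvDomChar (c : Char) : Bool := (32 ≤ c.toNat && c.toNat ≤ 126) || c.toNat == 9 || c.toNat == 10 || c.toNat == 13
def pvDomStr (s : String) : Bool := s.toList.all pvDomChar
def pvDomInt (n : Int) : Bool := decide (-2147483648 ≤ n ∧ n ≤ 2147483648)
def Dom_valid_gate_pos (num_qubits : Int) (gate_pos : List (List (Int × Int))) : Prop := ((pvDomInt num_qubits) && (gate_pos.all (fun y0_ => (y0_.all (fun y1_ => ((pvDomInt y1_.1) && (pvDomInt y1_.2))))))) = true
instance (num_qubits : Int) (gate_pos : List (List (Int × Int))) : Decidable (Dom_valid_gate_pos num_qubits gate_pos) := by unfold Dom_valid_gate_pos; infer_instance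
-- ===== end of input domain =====

-- B drops A's single pass with a per-layer membership set for two staged passes with no set:
-- a bounds-only pass, then a recursive pairwise gate-vs-gate endpoint comparison per layer;
-- objective: alternative (return value only, neither program mutates its arguments).

-- ===== PORT A =====
-- inner loop of A over one layer, carrying the running set gate_pos_layer_set
def pvLayerA (num_qubits : Int) : List (Int × Int) → PySem.Set Int → Bool
  | [], _ => true
  | pos :: rest, s =>
    if pos.1 < 0 || pos.1 > num_qubits - 1 then false
    else if pos.2 < 0 || pos.2 > num_qubits - 1 then false
    else if PySem.Set.contains s pos.1 || PySem.Set.contains s pos.2 then false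
    else pvLayerA num_qubits rest (PySem.Set.add (PySem.Set.add s pos.1) pos.2)

def valid_gate_pos (num_qubits : Int) (gate_pos : List (List (Int × Int))) : Bool :=
  gate_pos.all (fun layer => pvLayerA num_qubits layer PySem.Set.empty)

-- ===== PORT B =====
-- _layer_in_range: every endpoint of the layer references a qubit of the circuit
def pvLayerInRange (num_qubits : Int) (layer : List (Int × Int)) : Bool :=
  layer.all (fun p => 0 ≤ p.1 && p.1 < num_qubits && 0 ≤ p.2 && p.2 < num_qubits)

-- _disjoint_gates: the first gate shares no qubit with any later gate, recurse on the rest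
def pvDisjointGates : List (Int × Int) → Bool
  | [] => true
  | head :: rest =>
    if rest.any (fun g => head.1 == g.1 || head.1 == g.2 || head.2 == g.1 || head.2 == g.2)
    then false
    else pvDisjointGates rest

def valid_gate_pos_alt (num_qubits : Int) (gate_pos : List (List (Int × Int))) : Bool :=
  if !(gate_pos.all (fun layer => pvLayerInRange num_qubits layer)) then false
  else gate_pos.all (fun layer => pvDisjointGates layer)

-- ===== PRECONDITION & SPEC =====
def Spec_valid_gate_pos (num_qubits : Int) (gate_pos : List (List (Int × Int))) (out : Bool) : Prop := out = valid_gate_pos_alt num_qubits gate_pos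
instance (num_qubits : Int) (gate_pos : List (List (Int × Int))) (out : Bool) : Decidable (Spec_valid_gate_pos num_qubits gate_pos out) := by unfold Spec_valid_gate_pos; infer_instance

-- ===== CLAIM =====
def Claim_equal_valid_gate_pos : Prop := ∀ (num_qubits : Int) (gate_pos : List (List (Int × Int))), Dom_valid_gate_pos num_qubits gate_pos → Spec_valid_gate_pos num_qubits gate_pos (valid_gate_pos num_qubits gate_pos)

-- ===== LEMMAS AND PROOFS =====

-- two gates share an endpoint
def pvClash (a b : Int × Int) : Prop :=
  a.1 = b.1 ∨ a.1 = b.2 ∨ a.2 = b.1 ∨ a.2 = b.2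

-- characterization of A's inner loop: in range, pairwise disjoint, and untouched by s
lemma layerA_iff (n : Int) (layer : List (Int × Int)) (s : PySem.Set Int) :
    pvLayerA n layer s = true ↔
      (∀ p ∈ layer, 0 ≤ p.1 ∧ p.1 < n ∧ 0 ≤ p.2 ∧ p.2 < n) ∧
      layer.Pairwise (fun a b => ¬ pvClash a b) ∧
      (∀ p ∈ layer, p.1 ∉ s ∧ p.2 ∉ s) := by
  induction layer generalizing s with
  | nil => simp [pvLayerA]
  | cons pos rest ih =>
    simp only [pvLayerA]
    by_cases h1 : (pos.1 < 0 || pos.1 > n - 1) = true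
    · rw [if_pos h1]
      simp only [Bool.or_eq_true, decide_eq_true_eq] at h1
      constructor
      · intro h; exact absurd h (by simp)
      · rintro ⟨hr, -, -⟩
        have := hr pos (List.mem_cons_self)
        omega
    · rw [if_neg h1]
      by_cases h2 : (pos.2 < 0 || pos.2 > n - 1) = true
      · rw [if_pos h2]
        simp only [Bool.or_eq_true, decide_eq_true_eq] at h2
        constructor
        · intro h; exact absurd h (by simp)
        · rintro ⟨hr, -, -⟩
          have := hr pos (List.mem_cons_self)
          omega
      · rw [if_neg h2]
        simp only [Bool.or_eq_true, decide_eq_true_eq, not_or, not_lt] at h1 h2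
        by_cases hc : (PySem.Set.contains s pos.1 || PySem.Set.contains s pos.2) = true
        · rw [if_pos hc]
          simp only [Bool.or_eq_true, PySem.Set.contains_iff] at hc
          constructor
          · intro h; exact absurd h (by simp)
          · rintro ⟨-, -, hs⟩
            have := hs pos (List.mem_cons_self)
            tauto
        · rw [if_neg hc]
          simp only [Bool.or_eq_true, PySem.Set.contains_iff, not_or] at hc
          rw [ih]
          simp only [List.mem_cons, List.pairwise_cons, forall_eq_or_imp,
            PySem.Set.mem_add, not_or]
          unfold pvClash
          constructor
          · rintro ⟨hr, hp, hs⟩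
            refine ⟨⟨⟨h1.1, by omega, h2.1, by omega⟩, hr⟩, ⟨fun g hg => ?_, hp⟩, hc,
              fun g hg => ⟨(hs g hg).1.1.1, (hs g hg).2.1.1⟩⟩
            obtain ⟨⟨⟨-, e11⟩, e12⟩, ⟨-, e21⟩, e22⟩ := hs g hg
            omega
          · rintro ⟨⟨-, hr⟩, ⟨hnc, hp⟩, hc0, hs⟩
            refine ⟨hr, hp, fun g hg => ?_⟩
            have hm := hs g hg
            have he := hnc g hg
            refine ⟨⟨⟨hm.1, ?_⟩, ?_⟩, ⟨hm.2, ?_⟩, ?_⟩ <;> omega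

-- characterization of B's recursive pairwise check
lemma pvDisjoint_iff (layer : List (Int × Int)) :
    pvDisjointGates layer = true ↔ layer.Pairwise (fun a b => ¬ pvClash a b) := by
  induction layer with
  | nil => simp [pvDisjointGates]
  | cons head rest ih =>
    simp only [pvDisjointGates, List.pairwise_cons]
    unfold pvClash
    by_cases h : (rest.any (fun g => head.1 == g.1 || head.1 == g.2 || head.2 == g.1 || head.2 == g.2)) = true
    · rw [if_pos h]
      simp only [List.any_eq_true, Bool.or_eq_true, beq_iff_eq] at h
      obtain ⟨g, hg, hcl⟩ := h
      constructor
      · intro hfalse; exact absurd hfalse (by simp)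
      · rintro ⟨hno, -⟩
        exact (hno g hg (by tauto)).elim
    · rw [if_neg h]
      simp only [List.any_eq_true, Bool.or_eq_true, beq_iff_eq, not_exists] at h
      rw [ih]
      unfold pvClash
      constructor
      · intro hp
        refine ⟨fun g hg => fun hcl => h g ?_, hp⟩
        exact ⟨hg, by tauto⟩
      · rintro ⟨-, hp⟩; exact hp

-- ===== VERDICT =====
theorem valid_gate_pos_spec : Claim_equal_valid_gate_pos := by
  intro n gp _
  unfold Spec_valid_gate_pos
  rw [Bool.eq_iff_iff]
  unfold valid_gate_pos valid_gate_pos_alt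
  by_cases hr : (gp.all (fun layer => pvLayerInRange n layer)) = true
  · rw [hr]
    simp only [Bool.not_true, Bool.false_eq_true, if_false, List.all_eq_true] at *
    constructor
    · intro hA layer hl
      have := (layerA_iff n layer PySem.Set.empty).mp (hA layer hl)
      exact (pvDisjoint_iff layer).mpr this.2.1
    · intro hB layer hl
      refine (layerA_iff n layer PySem.Set.empty).mpr ⟨?_, (pvDisjoint_iff layer).mp (hB layer hl), by simp [PySem.Set.empty]⟩
      have := hr layer hl
      simp only [pvLayerInRange, List.all_eq_true, Bool.and_eq_true, decide_eq_true_eq] at this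
      intro p hp
      have := this p hp
      tauto
  · simp only [hr, Bool.not_false, if_true]
    simp only [List.all_eq_true, not_forall] at hr
    obtain ⟨layer, hl, hbad⟩ := hr
    simp only [List.all_eq_true]
    constructor
    · intro hA
      exfalso
      have := (layerA_iff n layer PySem.Set.empty).mp (hA layer hl)
      apply hbad
      simp only [pvLayerInRange, List.all_eq_true, Bool.and_eq_true, decide_eq_true_eq]
      intro p hp
      have := this.1 p hp
      tauto
    · intro h; exact absurd h (by simp)
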